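-- pv_equiv track=rewrite | github.com/T-Mukai/Programming_for_the_Puzzeied | Ch2/ex2-3.py | chooseTime
-- ===== SOURCE A (Python) =====
-- def chooseTime(times):
--
--     rweight = 0
--     maxweight = 0
--     time = 0
--
--     #Range through the times computing a running count of celebrities
--     for t in times:
--         if t[1] == 'start':
--             rweight = rweight + t[2]
--         elif t[1] == 'end':
--             rweight = rweight - t[2]
--         if rweight > maxweight:
--             maxweight = rweight
--             time = t[0]
--
--     return maxweight, time
-- ===== SOURCE B (Python) =====
-- def chooseTime(times):
--     # build the table of cumulative weights, then take max and first argmax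
--     cums = []
--     r = 0
--     for t in times:
--         r += t[2] if t[1] == 'start' else -t[2] if t[1] == 'end' else 0
--         cums.append(r)
--     m = max(cums, default=0)
--     if m <= 0:
--         return 0, 0
--     return m, times[cums.index(m)][0]
-- ===== Notes on version B (the rewrite author's own statement) =====
-- stated objective: alternative
-- what changed: A's single interleaved scan tracking running weight, max and argmax is replaced by build-a-prefix-sum-table, then max with default 0, then first-index lookup of that max.
import Mathlib
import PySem

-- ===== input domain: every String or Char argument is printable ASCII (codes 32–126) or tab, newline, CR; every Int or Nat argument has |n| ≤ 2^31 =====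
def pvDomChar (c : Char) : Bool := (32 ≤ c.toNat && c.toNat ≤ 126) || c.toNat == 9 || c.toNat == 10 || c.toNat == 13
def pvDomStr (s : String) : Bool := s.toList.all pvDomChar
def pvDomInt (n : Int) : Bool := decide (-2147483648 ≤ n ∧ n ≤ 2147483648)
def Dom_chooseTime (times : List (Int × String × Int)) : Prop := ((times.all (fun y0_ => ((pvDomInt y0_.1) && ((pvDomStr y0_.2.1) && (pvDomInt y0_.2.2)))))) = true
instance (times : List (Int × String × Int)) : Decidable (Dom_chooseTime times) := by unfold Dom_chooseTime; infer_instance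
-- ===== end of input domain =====

-- B replaces A's single interleaved max-tracking scan by table-then-argmax (same cost, different decomposition)

-- ===== PORT A =====
-- A's loop body, step for step
def pvStepA (st : Int × Int × Int) (t : Int × String × Int) : Int × Int × Int :=
  let r := if t.2.1 = "start" then st.1 + t.2.2
           else if t.2.1 = "end" then st.1 - t.2.2
           else st.1
  if r > st.2.1 then (r, r, t.1) else (r, st.2.1, st.2.2)

def chooseTime (times : List (Int × String × Int)) : Int × Int :=
  let s := times.foldl pvStepA (0, 0, 0)
  (s.2.1, s.2.2)

-- ===== PORT B =====
-- the signed delta of one event (the conditional expression in Source B's loop)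
def pvDelta (t : Int × String × Int) : Int :=
  if t.2.1 = "start" then t.2.2 else if t.2.1 = "end" then -t.2.2 else 0

-- Source B's first loop: the list of cumulative weights
def pvCums (r : Int) : List (Int × String × Int) → List Int
  | [] => []
  | t :: ts => (r + pvDelta t) :: pvCums (r + pvDelta t) ts

def chooseTime_alt (times : List (Int × String × Int)) : Int × Int :=
  let cums := pvCums 0 times
  let m := (PySem.List.max? cums (fun y => y)).getD 0   -- max(cums, default=0)
  if m ≤ 0 then (0, 0)
  else (m, ((PySem.List.index? cums m).bind
              (fun i => (PySem.List.pyGet? times (i : Int)).map Prod.fst)).getD 0)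
              -- times[cums.index(m)][0]; both lookups always succeed, .getD 0 is a totality guard

-- ===== PRECONDITION & SPEC =====
def Spec_chooseTime (times : List (Int × String × Int)) (out : Int × Int) : Prop := out = chooseTime_alt times
instance (times : List (Int × String × Int)) (out : Int × Int) : Decidable (Spec_chooseTime times out) := by unfold Spec_chooseTime; infer_instance

-- ===== CLAIM (what is proved, stated in full; the proofs are below) =====
def Claim_equal_chooseTime : Prop := ∀ (times : List (Int × String × Int)), Dom_chooseTime times → Spec_chooseTime times (chooseTime times)

-- ===== LEMMAS AND PROOFS =====

lemma pvStepA_eq (st : Int × Int × Int) (t : Int × String × Int) :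
    pvStepA st t = (if st.1 + pvDelta t > st.2.1
                    then (st.1 + pvDelta t, st.1 + pvDelta t, t.1)
                    else (st.1 + pvDelta t, st.2.1, st.2.2)) := by
  unfold pvStepA pvDelta
  by_cases h1 : t.2.1 = "start"
  · simp [h1]
  · by_cases h2 : t.2.1 = "end"
    · simp [h2, sub_eq_add_neg]
    · simp [h1, h2]

lemma foldl_max_init (l : List Int) : ∀ (a b : Int),
    l.foldl max (max a b) = max a (l.foldl max b) := by
  induction l with
  | nil => intro a b; simp
  | cons c t ih =>
      intro a b
      simpa [List.foldl, max_assoc] using ih a (max b c)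

lemma pvMain (ts : List (Int × String × Int)) : ∀ (r m tm : Int),
    (ts.foldl pvStepA (r, m, tm)).2 =
      (if (pvCums r ts).foldl max m ≤ m then (m, tm)
       else ((pvCums r ts).foldl max m,
             ((PySem.List.index? (pvCums r ts) ((pvCums r ts).foldl max m)).bind
                (fun i => (PySem.List.pyGet? ts (i : Int)).map Prod.fst)).getD 0)) := by
  induction ts with
  | nil => intro r m tm; simp [pvCums]
  | cons t ts ih =>
      intro r m tm
      by_cases hgt : r + pvDelta t > m
      · have hstep : pvStepA (r, m, tm) t =
            (r + pvDelta t, r + pvDelta t, t.1) := by rw [pvStepA_eq]; simp [hgt]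
        rw [List.foldl_cons, hstep, ih (r + pvDelta t) (r + pvDelta t) t.1]
        simp only [pvCums, List.foldl_cons]
        rw [show max m (r + pvDelta t) = r + pvDelta t from max_eq_right (le_of_lt hgt)]
        set r' := r + pvDelta t with hr'def
        set K := (pvCums r' ts).foldl max r' with hKdef
        have hK := PySem.List.le_foldl_max (pvCums r' ts) r'
        have hKm : ¬ K ≤ m := by omega
        rw [if_neg hKm]
        by_cases hKr : K ≤ r'
        · have hKeq : K = r' := le_antisymm hKr hK.1
          rw [if_pos hKr, ← hKeq, PySem.List.index?_cons_self]
          simp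
        · rw [if_neg hKr]
          have hne : r' ≠ K := by omega
          rw [PySem.List.index?_cons_of_ne _ hne]
          cases hidx : PySem.List.index? (pvCums r' ts) K with
          | none => simp
          | some i =>
              simp only [Option.map_some, Option.bind_some]
              rw [show ((i + 1 : Nat) : Int) = (i : Int) + 1 by push_cast; ring,
                  PySem.List.pyGet?_cons_succ]
      · have hstep : pvStepA (r, m, tm) t = (r + pvDelta t, m, tm) := by
          rw [pvStepA_eq]; simp [hgt]
        rw [List.foldl_cons, hstep, ih (r + pvDelta t) m tm]
        simp only [pvCums, List.foldl_cons]
        rw [show max m (r + pvDelta t) = m from max_eq_left (not_lt.mp hgt)]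
        set r' := r + pvDelta t with hr'def
        set K := (pvCums r' ts).foldl max m with hKdef
        have hmK : m ≤ K := (PySem.List.le_foldl_max _ _).1
        by_cases hKm : K ≤ m
        · rw [if_pos hKm, if_pos hKm]
        · rw [if_neg hKm, if_neg hKm]
          have hne : r' ≠ K := by omega
          rw [PySem.List.index?_cons_of_ne _ hne]
          cases hidx : PySem.List.index? (pvCums r' ts) K with
          | none => simp
          | some i =>
              simp only [Option.map_some, Option.bind_some]
              rw [show ((i + 1 : Nat) : Int) = (i : Int) + 1 by push_cast; ring,
                  PySem.List.pyGet?_cons_succ]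

-- ===== VERDICT (by name: the statement is the Claim_ definition above) =====
theorem chooseTime_spec : Claim_equal_chooseTime := by
  intro times _
  show chooseTime times = chooseTime_alt times
  simp only [chooseTime, chooseTime_alt]
  rw [pvMain times 0 0 0]
  cases hc : pvCums 0 times with
  | nil => simp [PySem.List.max?]
  | cons x t =>
      rw [PySem.List.max?_id_cons]
      simp only [Option.getD_some, List.foldl_cons]
      rw [show max (0 : Int) x = max 0 x from rfl,
          show List.foldl max (max (0 : Int) x) t = max 0 (List.foldl max x t) from
            foldl_max_init t 0 x]
      set K := List.foldl max x t with hK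
      by_cases hKpos : K ≤ 0
      · simp [hKpos]
      · rw [show max (0 : Int) K = K from max_eq_right (by omega)]
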